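-- pv_equiv track=rewrite | github.com/plexicus/reticulum | src/reticulum/build_context_analyzer.py | _consolidate_paths
-- ===== SOURCE A (Python) =====
-- from typing import Dict, Any, Optional, List
--
-- def _consolidate_paths(paths: List[str]) -> List[str]:
--     """Consolidate paths to remove redundant parent/child relationships."""
--     if not paths:
--         return []
--
--     # Sort paths by length (shortest first)
--     sorted_paths = sorted(paths, key=len)
--
--     consolidated = []
--     for path in sorted_paths:
--         # Check if this path is already covered by a parent path
--         is_covered = any(
--             path.startswith(existing + "/") or path == existing
--             for existing in consolidated
--         )
--
--         if not is_covered: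
--             # Remove any existing paths that are children of this one
--             consolidated = [
--                 p
--                 for p in consolidated
--                 if not (p.startswith(path + "/") or p == path)
--             ]
--             consolidated.append(path)
--
--     return sorted(consolidated)
-- ===== SOURCE B (Python) =====
-- def _consolidate_paths(paths):
--     kept = set()
--     for path in sorted(paths, key=len):
--         if path in kept:
--             continue
--         if any(path[:i] in kept for i, c in enumerate(path) if c == '/'):
--             continue
--         kept.add(path)
--     return sorted(kept)
-- ===== Notes on version B (the rewrite author's own statement) =====
-- stated objective: faster
-- what changed: Instead of scanning the whole kept list for an ancestor of each path (and re-filtering it), B keeps a hash set and tests only the path's own '/'-cut prefixes against it, with no removal pass at all.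
import Mathlib
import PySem

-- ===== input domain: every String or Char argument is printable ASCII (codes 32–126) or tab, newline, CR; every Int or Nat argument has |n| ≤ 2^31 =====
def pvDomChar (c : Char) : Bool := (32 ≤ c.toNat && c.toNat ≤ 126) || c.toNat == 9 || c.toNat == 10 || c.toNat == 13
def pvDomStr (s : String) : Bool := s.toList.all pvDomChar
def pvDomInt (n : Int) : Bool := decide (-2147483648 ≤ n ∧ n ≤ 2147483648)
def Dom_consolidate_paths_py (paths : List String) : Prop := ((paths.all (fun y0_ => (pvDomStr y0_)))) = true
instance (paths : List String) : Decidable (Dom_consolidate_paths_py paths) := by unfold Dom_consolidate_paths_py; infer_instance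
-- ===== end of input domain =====

-- B replaces A's inner scan of the kept list (and its child-removal pass) by set-membership
-- tests of each path's own '/'-cut prefixes; objective: faster.

-- ===== PORT A =====
-- A, step for step, with strings as List Char (PySem.Chars is exact on the string side).
def consolidate_paths_py (paths : List String) : List String :=
  if paths = [] then []
  else
    let sorted_paths := PySem.List.sorted (paths.map (·.toList)) (fun s => s.length) false
    let consolidated := sorted_paths.foldl
      (fun consolidated path =>
        let is_covered := consolidated.any
          (fun existing => PySem.Chars.startswith path (existing ++ ['/']) || path == existing)
        if !is_covered then
          (consolidated.filter
            (fun p => !(PySem.Chars.startswith p (path ++ ['/']) || p == path))) ++ [path]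
        else consolidated) []
    (PySem.List.sorted consolidated (fun x => x) false).map String.ofList

-- ===== PORT B =====
-- B: one pass over the length-sorted paths keeping a set; a path is dropped iff it or one of
-- its '/'-cut prefixes (path[:i] with path[i] = '/') is already in the set.
def consolidate_paths_py_alt (paths : List String) : List String :=
  let kept : PySem.Set (List Char) :=
    (PySem.List.sorted (paths.map (·.toList)) (fun s => s.length) false).foldl
      (fun kept path =>
        if PySem.Set.contains kept path then kept
        else if (PySem.List.enumerate path 0).any
            (fun ic => ic.2 == '/' && PySem.Set.contains kept (path.take ic.1.toNat)) then kept
        else PySem.Set.add kept path)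
      PySem.Set.empty
  (PySem.List.sorted kept (fun x => x) false).map String.ofList

-- ===== PRECONDITION & SPEC =====
def Spec_consolidate_paths_py (paths : List String) (out : List String) : Prop := out = consolidate_paths_py_alt paths
instance (paths : List String) (out : List String) : Decidable (Spec_consolidate_paths_py paths out) := by unfold Spec_consolidate_paths_py; infer_instance

-- ===== CLAIM (what is proved, stated in full; the proofs are below) =====
def Claim_equal_consolidate_paths_py : Prop := ∀ (paths : List String), Dom_consolidate_paths_py paths → Spec_consolidate_paths_py paths (consolidate_paths_py paths)

-- ===== LEMMAS AND PROOFS =====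

theorem pv_cov_iff (acc : List (List Char)) (path : List Char) :
    (acc.any (fun e => PySem.Chars.startswith path (e ++ ['/']) || path == e) = true)
    ↔ (path ∈ acc ∨ (PySem.List.enumerate path 0).any
        (fun ic => ic.2 == '/' && PySem.Set.contains acc (path.take ic.1.toNat)) = true) := by
  simp only [List.any_eq_true, Bool.or_eq_true, PySem.Chars.startswith_iff, beq_iff_eq,
    Bool.and_eq_true, PySem.Set.contains_iff, PySem.List.mem_enumerate_iff]
  constructor
  · rintro ⟨e, he, ⟨t, ht⟩ | rfl⟩
    · subst ht
      right
      have hlt : e.length < (e ++ ['/'] ++ t).length := by simp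
      refine ⟨((0:Int) + e.length, (e ++ ['/'] ++ t)[e.length]), ⟨e.length, hlt, rfl⟩, ?_, ?_⟩
      · show (e ++ ['/'] ++ t)[e.length]'hlt = '/'
        simp
      · show (e ++ ['/'] ++ t).take ((0:Int) + (e.length:Int)).toNat ∈ acc
        have h2 : ((0:Int) + (e.length:Int)).toNat = e.length := by omega
        rw [h2, List.append_assoc, List.take_left]
        exact he
    · exact Or.inl he
  · rintro (h | ⟨p, ⟨k, hk, rfl⟩, hc, hm⟩)
    · exact ⟨path, h, Or.inr rfl⟩
    · simp only at hc hm
      have hkn : ((0:Int) + (k:Int)).toNat = k := by omega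
      rw [hkn] at hm
      refine ⟨path.take k, hm, Or.inl ?_⟩
      have : path.take k ++ ['/'] = path.take (k+1) := by
        rw [List.take_add_one, List.getElem?_eq_getElem hk, hc]
        rfl
      rw [this]
      exact List.take_prefix _ _

theorem pv_step_eq (acc : List (List Char)) (path : List Char)
    (hlen : ∀ p ∈ acc, p.length ≤ path.length) :
    (if !(acc.any (fun existing => PySem.Chars.startswith path (existing ++ ['/']) || path == existing)) then
      (acc.filter (fun p => !(PySem.Chars.startswith p (path ++ ['/']) || p == path))) ++ [path]
    else acc)
    =
    (if PySem.Set.contains acc path then acc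
     else if (PySem.List.enumerate path 0).any
         (fun ic => ic.2 == '/' && PySem.Set.contains acc (path.take ic.1.toNat)) then acc
     else PySem.Set.add acc path) := by
  by_cases hcov : acc.any (fun e => PySem.Chars.startswith path (e ++ ['/']) || path == e) = true
  · rw [hcov]
    simp only [Bool.not_true]
    rw [if_neg Bool.false_ne_true]
    rcases (pv_cov_iff acc path).mp hcov with h | h
    · rw [if_pos ((PySem.Set.contains_iff acc path).mpr h)]
    · by_cases h1 : PySem.Set.contains acc path = true
      · rw [if_pos h1]
      · rw [if_neg h1, if_pos h]
  · have hmem : path ∉ acc := fun h => hcov ((pv_cov_iff acc path).mpr (Or.inl h))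
    have h2 : ¬ ((PySem.List.enumerate path 0).any
        (fun ic => ic.2 == '/' && PySem.Set.contains acc (path.take ic.1.toNat)) = true) :=
      fun h => hcov ((pv_cov_iff acc path).mpr (Or.inr h))
    rw [Bool.eq_false_iff.mpr hcov]
    simp only [Bool.not_false, if_true]
    rw [if_neg (fun h => hmem ((PySem.Set.contains_iff acc path).mp h)), if_neg h2,
      PySem.Set.add_of_not_mem hmem]
    congr 1
    rw [List.filter_eq_self]
    intro p hp
    simp only [Bool.not_eq_eq_eq_not, Bool.not_true, Bool.or_eq_false_iff]
    constructor
    · rw [Bool.eq_false_iff]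
      intro hs
      have hpre := (PySem.Chars.startswith_iff p (path ++ ['/'])).mp hs
      have h3 := hpre.length_le
      have h4 := hlen p hp
      simp only [List.length_append, List.length_cons, List.length_nil] at h3
      omega
    · rw [beq_eq_false_iff_ne]
      intro hpe
      exact hmem (hpe ▸ hp)

theorem pv_fold_eq (L : List (List Char)) (acc : List (List Char))
    (hL : ∀ p ∈ acc, ∀ q ∈ L, p.length ≤ q.length)
    (hP : L.Pairwise (fun a b => a.length ≤ b.length)) :
    L.foldl
      (fun consolidated path =>
        let is_covered := consolidated.any
          (fun existing => PySem.Chars.startswith path (existing ++ ['/']) || path == existing)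
        if !is_covered then
          (consolidated.filter
            (fun p => !(PySem.Chars.startswith p (path ++ ['/']) || p == path))) ++ [path]
        else consolidated) acc
    =
    L.foldl
      (fun kept path =>
        if PySem.Set.contains kept path then kept
        else if (PySem.List.enumerate path 0).any
            (fun ic => ic.2 == '/' && PySem.Set.contains kept (path.take ic.1.toNat)) then kept
        else PySem.Set.add kept path) acc := by
  induction L generalizing acc with
  | nil => rfl
  | cons x xs ih =>
    simp only [List.foldl_cons]
    rw [pv_step_eq acc x (fun p hp => hL p hp x (List.mem_cons_self))]
    apply ih
    · intro p hp q hq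
      have hmem : p ∈ acc ∨ p = x := by
        split_ifs at hp with h1 h2
        · exact Or.inl hp
        · exact Or.inl hp
        · exact (PySem.Set.mem_add acc x p).mp hp
      rcases hmem with h | rfl
      · exact le_trans (hL p h x (List.mem_cons_self)) ((List.pairwise_cons.mp hP).1 q hq)
      · exact (List.pairwise_cons.mp hP).1 q hq
    · exact (List.pairwise_cons.mp hP).2

-- ===== VERDICT (by name: the statement is the Claim_ definition above) =====
theorem consolidate_paths_py_spec : Claim_equal_consolidate_paths_py := by
  intro paths _
  unfold Spec_consolidate_paths_py consolidate_paths_py consolidate_paths_py_alt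
  by_cases h : paths = []
  · subst h; rfl
  · rw [if_neg h]
    dsimp only
    rw [pv_fold_eq _ [] (fun p hp => absurd hp (by simp))
      (PySem.List.sorted_pairwise (paths.map (·.toList)) (fun s => s.length))]
    rfl
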